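-- pv_equiv track=rewrite | github.com/RUCAIBox/UniSRec | dataset/preprocessing/process_amazon.py | make_inters_in_order
-- ===== SOURCE A (Python) =====
-- import collections
--
-- def make_inters_in_order(inters):
--     user2inters, new_inters = collections.defaultdict(list), list()
--     for inter in inters:
--         user, item, rating, timestamp = inter
--         user2inters[user].append((user, item, rating, timestamp))
--     for user in user2inters:
--         user_inters = user2inters[user]
--         user_inters.sort(key=lambda d: d[3])
--         for inter in user_inters:
--             new_inters.append(inter)
--     return new_inters
-- ===== SOURCE B (Python) =====
-- def make_inters_in_order(inters):
--     # one global stable sort by (first-appearance index of user, timestamp)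
--     first = {}
--     new_inters = []
--     for inter in inters:
--         user, item, rating, timestamp = inter
--         first.setdefault(user, len(first))
--         new_inters.append((user, item, rating, timestamp))
--     new_inters.sort(key=lambda t: (first[t[0]], t[3]))
--     return new_inters
-- ===== Notes on version B (the rewrite author's own statement) =====
-- stated objective: alternative
-- what changed: Replaces per-user dict bucketing followed by one timestamp sort per user with a single pass that records each user's first-appearance index and one global stable sort by the composite key (first-appearance index, timestamp).
import Mathlib
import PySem

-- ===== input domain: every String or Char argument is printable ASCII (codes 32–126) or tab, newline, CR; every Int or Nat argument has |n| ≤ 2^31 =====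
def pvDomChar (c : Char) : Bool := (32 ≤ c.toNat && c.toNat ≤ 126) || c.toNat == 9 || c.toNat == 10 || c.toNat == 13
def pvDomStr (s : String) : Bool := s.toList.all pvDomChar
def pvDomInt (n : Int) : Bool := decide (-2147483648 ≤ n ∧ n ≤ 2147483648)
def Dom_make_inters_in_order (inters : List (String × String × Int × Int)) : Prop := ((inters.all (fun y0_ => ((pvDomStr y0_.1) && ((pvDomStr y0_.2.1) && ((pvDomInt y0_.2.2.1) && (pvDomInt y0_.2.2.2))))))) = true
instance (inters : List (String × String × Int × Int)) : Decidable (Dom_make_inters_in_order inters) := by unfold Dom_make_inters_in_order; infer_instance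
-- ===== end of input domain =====

-- B replaces A's per-user bucketing followed by one sort per user with a single stable sort of the
-- whole list under the composite key (first-appearance index of the user, timestamp): alternative decomposition.

-- ===== PORT A =====
-- groups interactions per user in a dict, sorts each user's list by timestamp, concatenates in key order
def make_inters_in_order (inters : List (String × String × Int × Int)) : List (String × String × Int × Int) :=
  let user2inters : PySem.Dict String (List (String × String × Int × Int)) :=
    inters.foldl (fun d inter => d.modify inter.1 [] (fun l => l ++ [inter])) PySem.Dict.empty
  user2inters.keys.foldl
    (fun new_inters user =>
      (PySem.List.sorted (user2inters.getD user []) (fun d => d.2.2.2)).foldl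
        (fun acc inter => acc ++ [inter]) new_inters)
    []

-- ===== PORT B =====
-- one pass records each user's first-appearance index, then one stable sort by (that index, timestamp)
def make_inters_in_order_alt (inters : List (String × String × Int × Int)) : List (String × String × Int × Int) :=
  let first : PySem.Dict String Int :=
    inters.foldl (fun d inter => d.setdefault inter.1 ((d.size : Int))) PySem.Dict.empty
  PySem.List.sorted2 inters (fun t => first.getD t.1 0) (fun t => t.2.2.2)

-- ===== PRECONDITION & SPEC =====
def Spec_make_inters_in_order (inters : List (String × String × Int × Int)) (out : List (String × String × Int × Int)) : Prop := out = make_inters_in_order_alt inters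
instance (inters : List (String × String × Int × Int)) (out : List (String × String × Int × Int)) : Decidable (Spec_make_inters_in_order inters out) := by unfold Spec_make_inters_in_order; infer_instance

-- ===== CLAIM (what is proved, stated in full; the proofs are below) =====
def Claim_equal_make_inters_in_order : Prop := ∀ (inters : List (String × String × Int × Int)), Dom_make_inters_in_order inters → Spec_make_inters_in_order inters (make_inters_in_order inters)

-- ===== LEMMAS AND PROOFS =====

-- the value list accumulated for a user is exactly the filter of the input by that user
theorem pv_getD_group (xs : List (String × String × Int × Int))
    (d : PySem.Dict String (List (String × String × Int × Int))) (u : String) :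
    (xs.foldl (fun d inter => d.modify inter.1 [] (fun l => l ++ [inter])) d).getD u []
      = d.getD u [] ++ xs.filter (fun t => t.1 == u) := by
  induction xs generalizing d with
  | nil => simp
  | cons t ts ih =>
    simp only [List.foldl_cons, ih, List.filter_cons]
    rw [PySem.Dict.getD_modify]
    by_cases h : u = t.1
    · simp [h]
    · have hne : (t.1 == u) = false := beq_eq_false_iff_ne.mpr (fun e => h e.symm)
      simp [h, hne]

-- "insertBy walks past a prefix it never goes before"
theorem pv_insertBy_skip {α : Type} (before : α → α → Bool) (x : α) (A1 rest : List α)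
    (h : ∀ y ∈ A1, before x y = false) :
    PySem.List.insertBy before x (A1 ++ rest) = A1 ++ PySem.List.insertBy before x rest := by
  induction A1 with
  | nil => simp
  | cons a A ih =>
    have ha := h a (by simp)
    simp [PySem.List.insertBy, ha, ih (fun y hy => h y (by simp [hy]))]

-- insertion lands inside the group segment: agree on the group, always-before on the tail
theorem pv_insertBy_seg {α : Type} (before before' : α → α → Bool) (x : α) (G A2 : List α)
    (hG : ∀ y ∈ G, before x y = before' x y) (hA : ∀ y ∈ A2, before x y = true) :
    PySem.List.insertBy before x (G ++ A2) = PySem.List.insertBy before' x G ++ A2 := by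
  induction G with
  | nil =>
    cases A2 with
    | nil => simp [PySem.List.insertBy]
    | cons a A => simp [PySem.List.insertBy, hA a (by simp)]
  | cons g gs ih =>
    have hg := hG g (by simp)
    by_cases hb : before x g
    · simp [PySem.List.insertBy, hb, hg ▸ hb]
    · simp only [Bool.not_eq_true] at hb
      simp [PySem.List.insertBy, hb, hg ▸ hb, ih (fun y hy => hG y (by simp [hy]))]

-- every member of a sorted filtered group carries that group's user
theorem pv_mem_group (xs : List (String × String × Int × Int)) (u : String)
    (a : String × String × Int × Int)
    (ha : a ∈ PySem.List.sorted (xs.filter (fun t => t.1 == u)) (fun t => t.2.2.2)) :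
    a.1 = u := by
  rw [PySem.List.mem_sorted] at ha
  exact beq_iff_eq.mp (List.mem_filter.mp ha).2

-- one snoc step of the stable sorts, as explicit insertions
theorem pv_sorted2_snoc {α : Type} (xs : List α) (x : α) (k1 k2 : α → Int) :
    PySem.List.sorted2 (xs ++ [x]) k1 k2
      = PySem.List.insertBy
          (fun a b => decide (k1 a < k1 b) || (!decide (k1 b < k1 a) && decide (k2 a < k2 b)))
          x (PySem.List.sorted2 xs k1 k2) := by
  simp [PySem.List.sorted2, List.foldl_append]

theorem pv_sorted_snoc {α : Type} (xs : List α) (x : α) (key : α → Int) :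
    PySem.List.sorted (xs ++ [x]) key
      = PySem.List.insertBy (fun a b => decide (key a < key b)) x (PySem.List.sorted xs key) := by
  rw [PySem.List.sorted_eq_foldl_insertBy, PySem.List.sorted_eq_foldl_insertBy, List.foldl_append]
  rfl

-- MAIN: a stable sort by (K of user, timestamp) with K strictly increasing along U
-- equals the concatenation over U of the per-user timestamp sorts
theorem pv_main (U : List String) (K : String → Int)
    (hp : (U.map K).Pairwise (· < ·)) :
    ∀ xs : List (String × String × Int × Int), (∀ t ∈ xs, t.1 ∈ U) →
    PySem.List.sorted2 xs (fun t => K t.1) (fun t => t.2.2.2)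
      = U.flatMap (fun u => PySem.List.sorted (xs.filter (fun t => t.1 == u)) (fun t => t.2.2.2)) := by
  intro xs
  induction xs using List.reverseRecOn with
  | nil => intro _; simp [PySem.List.sorted2, PySem.List.sorted]
  | append_singleton ts t ih =>
    intro hmem
    have hts : ∀ a ∈ ts, a.1 ∈ U := fun a ha => hmem a (by simp [ha])
    obtain ⟨U1, U2, hUeq⟩ := List.append_of_mem (hmem t (by simp))
    -- order facts from the pairwise hypothesis
    have hpm := hp
    rw [hUeq, List.map_append, List.map_cons, List.pairwise_append] at hpm
    obtain ⟨-, hp2, hcross⟩ := hpm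
    have hlt1 : ∀ u ∈ U1, K u < K t.1 := fun u hu =>
      hcross (K u) (List.mem_map_of_mem hu) (K t.1) (by simp)
    have hlt2 : ∀ u ∈ U2, K t.1 < K u := fun u hu =>
      (List.pairwise_cons.mp hp2).1 (K u) (List.mem_map_of_mem hu)
    have hne1 : ∀ u ∈ U1, (t.1 == u) = false :=
      fun u hu => beq_eq_false_iff_ne.mpr (fun e => lt_irrefl _ (e ▸ hlt1 u hu))
    have hne2 : ∀ u ∈ U2, (t.1 == u) = false :=
      fun u hu => beq_eq_false_iff_ne.mpr (fun e => lt_irrefl _ (e ▸ hlt2 u hu))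
    rw [pv_sorted2_snoc, ih hts, hUeq, List.flatMap_append, List.flatMap_cons,
        List.flatMap_append, List.flatMap_cons]
    -- groups of users other than t.1 are unchanged by appending t
    have hgrp : ∀ u, (t.1 == u) = false →
        ((ts ++ [t]).filter (fun a => a.1 == u)) = ts.filter (fun a => a.1 == u) := by
      intro u hu; rw [List.filter_append]; simp [hu]
    have hflat1 : U1.flatMap (fun u => PySem.List.sorted ((ts ++ [t]).filter (fun a => a.1 == u)) (fun a => a.2.2.2))
        = U1.flatMap (fun u => PySem.List.sorted (ts.filter (fun a => a.1 == u)) (fun a => a.2.2.2)) :=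
      List.flatMap_congr (fun u hu => by rw [hgrp u (hne1 u hu)])
    have hflat2 : U2.flatMap (fun u => PySem.List.sorted ((ts ++ [t]).filter (fun a => a.1 == u)) (fun a => a.2.2.2))
        = U2.flatMap (fun u => PySem.List.sorted (ts.filter (fun a => a.1 == u)) (fun a => a.2.2.2)) :=
      List.flatMap_congr (fun u hu => by rw [hgrp u (hne2 u hu)])
    rw [hflat1, hflat2]
    -- the group of t.1 absorbs t by one stable insertion
    have hG : (ts ++ [t]).filter (fun a => a.1 == t.1) = ts.filter (fun a => a.1 == t.1) ++ [t] := by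
      rw [List.filter_append]; simp
    rw [hG, pv_sorted_snoc]
    -- now move the insertion past the earlier groups and into t.1's segment
    rw [pv_insertBy_skip _ t _ _ ?_, pv_insertBy_seg _ _ t _ _ ?_ ?_]
    · -- inside t.1's segment the composite comparison degenerates to the timestamp one
      intro y hy
      have h1 : K y.1 = K t.1 := by rw [pv_mem_group ts t.1 y hy]
      simp [h1]
    · -- the insertion never passes a later user's segment
      intro y hy
      obtain ⟨u, hu, hyu⟩ := List.mem_flatMap.mp hy
      have h1 : K t.1 < K y.1 := pv_mem_group ts u y hyu ▸ hlt2 u hu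
      simp [h1]
    · -- the insertion walks past every earlier user's segment
      intro y hy
      obtain ⟨u, hu, hyu⟩ := List.mem_flatMap.mp hy
      have h1 : K y.1 < K t.1 := pv_mem_group ts u y hyu ▸ hlt1 u hu
      have h2 : decide (K t.1 < K y.1) = false := decide_eq_false (not_lt.mpr (le_of_lt h1))
      have h3 : decide (K y.1 < K t.1) = true := decide_eq_true h1
      simp [h2, h3]

-- first-appearance dict: explicit description
def pvNumbered : List String → Int → List (String × Int)
  | [], _ => []
  | u :: us, i => (u, i) :: pvNumbered us (i + 1)

theorem pv_numbered_fst (us : List String) (i : Int) : (pvNumbered us i).map (·.1) = us := by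
  induction us generalizing i with
  | nil => rfl
  | cons u us ih => simp [pvNumbered, ih]

theorem pv_numbered_length (us : List String) (i : Int) : (pvNumbered us i).length = us.length := by
  induction us generalizing i with
  | nil => rfl
  | cons u us ih => simp [pvNumbered, ih]

theorem pv_numbered_snoc (us : List String) (u : String) (i : Int) :
    pvNumbered (us ++ [u]) i = pvNumbered us i ++ [(u, i + us.length)] := by
  induction us generalizing i with
  | nil => simp [pvNumbered]
  | cons v vs ih => simp [pvNumbered, ih]; ring

theorem pv_ofList_snoc (l : List String) (x : String) :
    PySem.Set.ofList (l ++ [x]) = PySem.Set.add (PySem.Set.ofList l) x := by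
  rw [PySem.Set.ofList_eq_foldl, PySem.Set.ofList_eq_foldl, List.foldl_append]
  rfl

theorem pv_first_dict (xs : List (String × String × Int × Int)) :
    xs.foldl (fun d inter => d.setdefault inter.1 ((d.size : Int))) PySem.Dict.empty
      = PySem.Dict.mk (pvNumbered (PySem.Set.ofList (xs.map (·.1))) 0) := by
  induction xs using List.reverseRecOn with
  | nil => rfl
  | append_singleton ts t ih =>
    rw [List.foldl_append, List.foldl_cons, List.foldl_nil, ih, List.map_append, List.map_cons,
      List.map_nil, pv_ofList_snoc]
    have hkeys : (PySem.Dict.mk (pvNumbered (PySem.Set.ofList (ts.map (·.1))) 0)).keys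
        = PySem.Set.ofList (ts.map (·.1)) := by
      simp only [PySem.Dict.keys]; exact pv_numbered_fst _ _
    by_cases hmem : t.1 ∈ PySem.Set.ofList (ts.map (·.1))
    · have hc : (PySem.Dict.mk (pvNumbered (PySem.Set.ofList (ts.map (·.1))) 0)).contains t.1 = true :=
        (PySem.Dict.contains_iff_mem_keys _ _).mpr (by rw [hkeys]; exact hmem)
      rw [PySem.Dict.setdefault_of_contains _ _ hc]
      have : PySem.Set.add (PySem.Set.ofList (ts.map (·.1))) t.1 = PySem.Set.ofList (ts.map (·.1)) := by
        simp [PySem.Set.add, PySem.Set.contains, hmem]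
      rw [this]
    · have hc : (PySem.Dict.mk (pvNumbered (PySem.Set.ofList (ts.map (·.1))) 0)).contains t.1 = false := by
        rw [← Bool.not_eq_true]
        intro hcon
        have := (PySem.Dict.contains_iff_mem_keys _ _).mp hcon
        rw [hkeys] at this
        exact hmem this
      rw [PySem.Dict.setdefault_of_not_contains _ _ hc]
      have hadd : PySem.Set.add (PySem.Set.ofList (ts.map (·.1))) t.1
          = PySem.Set.ofList (ts.map (·.1)) ++ [t.1] := by
        simp [PySem.Set.add, PySem.Set.contains, hmem]
      apply PySem.Dict.ext
      rw [PySem.Dict.items_insert_of_not_contains _ _ hc, hadd, pv_numbered_snoc]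
      simp [PySem.Dict.size, pv_numbered_length]

theorem pv_numbered_snd_lb (us : List String) (i : Int) :
    ∀ p ∈ pvNumbered us i, i ≤ p.2 := by
  induction us generalizing i with
  | nil => intro p hp; cases hp
  | cons u us ih =>
    intro p hp
    rcases List.mem_cons.mp hp with h | h
    · simp [h]
    · have := ih (i + 1) p h; omega

theorem pv_numbered_snd_pairwise (us : List String) (i : Int) :
    ((pvNumbered us i).map (·.2)).Pairwise (· < ·) := by
  induction us generalizing i with
  | nil => simp [pvNumbered]
  | cons u us ih =>
    simp only [pvNumbered, List.map_cons, List.pairwise_cons]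
    refine ⟨?_, ih (i + 1)⟩
    intro b hb
    obtain ⟨p, hp, rfl⟩ := List.mem_map.mp hb
    have := pv_numbered_snd_lb us (i + 1) p hp; omega

theorem pv_first_keys_pairwise (U : List String) (hU : U.Nodup) :
    (U.map (fun u => (PySem.Dict.mk (pvNumbered U 0)).getD u 0)).Pairwise (· < ·) := by
  have hkeys : (PySem.Dict.mk (pvNumbered U 0)).keys = U := by
    simp only [PySem.Dict.keys]; exact pv_numbered_fst _ _
  have hnd : (PySem.Dict.mk (pvNumbered U 0)).keys.Nodup := by rw [hkeys]; exact hU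
  have hv := PySem.Dict.values_eq_map_keys (PySem.Dict.mk (pvNumbered U 0)) hnd (0 : Int)
  rw [hkeys] at hv
  rw [← hv]
  simpa only [PySem.Dict.values] using pv_numbered_snd_pairwise U 0

-- ===== VERDICT (by name: the statement is the Claim_ definition above) =====
theorem make_inters_in_order_spec : Claim_equal_make_inters_in_order := by
  intro inters _
  unfold Spec_make_inters_in_order
  simp only [make_inters_in_order, make_inters_in_order_alt]
  rw [pv_first_dict]
  have hmem : ∀ t ∈ inters, t.1 ∈ PySem.Set.ofList (inters.map (·.1)) := by
    intro t ht
    exact (PySem.Set.mem_ofList _ _).mpr (List.mem_map_of_mem ht)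
  rw [pv_main (PySem.Set.ofList (inters.map (·.1))) _
      (pv_first_keys_pairwise _ (PySem.Set.nodup_ofList _)) inters hmem]
  have hkeys : (inters.foldl (fun d inter => d.modify inter.1 [] (fun l => l ++ [inter])) PySem.Dict.empty).keys
      = PySem.Set.ofList (inters.map (·.1)) := by
    rw [PySem.Dict.keys_foldl_modify_key inters (fun t => t.1) [] (fun _ x l => l ++ [x]) PySem.Dict.empty,
      PySem.Dict.keys_empty, PySem.Set.ofList_eq_foldl]
    rfl
  simp only [PySem.List.foldl_append_singleton, pv_getD_group, PySem.Dict.getD_empty,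
    List.nil_append, PySem.List.foldl_append_eq_flatMap, hkeys]
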